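-- pv_equiv track=rewrite | github.com/Tariq60/FactVsOp | src/features/extract_bert_features.py | get_sent_labels
-- ===== SOURCE A (Python) =====
-- def get_sent_labels(token_list):
--     sent_labels, sentences, sent_start = [], [], 0
--     for i, line in enumerate(token_list):
--         if line == '\n':
--             sentences.append(sent_labels)
--             sent_labels = []
--         else:
--             token, label = line.rstrip().split()
--             sent_labels.append(label)
--     return sentences
-- ===== SOURCE B (Python) =====
-- def get_sent_labels(token_list):
--     # phase 1: parse every line into its label; '\n' becomes a break marker
--     labels = []
--     for line in token_list:
--         if line == '\n':
--             labels.append(None)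
--         else:
--             token, label = line.rstrip().split()
--             labels.append(label)
--     # phase 2: cut the label stream at the break markers; the tail after the
--     # last marker belongs to no sentence and is dropped
--     sentences = []
--     while None in labels:
--         b = labels.index(None)
--         sentences.append(labels[:b])
--         labels = labels[b + 1:]
--     return sentences
-- ===== Notes on version B (the rewrite author's own statement) =====
-- stated objective: alternative
-- what changed: B replaces A's single interleaved accumulate-and-emit loop by a two-phase scheme: a first pass parses every line into its label (with '\n' becoming a break marker), then a second phase repeatedly cuts the label stream at the next marker via list.index and slicing, dropping the tail after the last marker.
import Mathlib
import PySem

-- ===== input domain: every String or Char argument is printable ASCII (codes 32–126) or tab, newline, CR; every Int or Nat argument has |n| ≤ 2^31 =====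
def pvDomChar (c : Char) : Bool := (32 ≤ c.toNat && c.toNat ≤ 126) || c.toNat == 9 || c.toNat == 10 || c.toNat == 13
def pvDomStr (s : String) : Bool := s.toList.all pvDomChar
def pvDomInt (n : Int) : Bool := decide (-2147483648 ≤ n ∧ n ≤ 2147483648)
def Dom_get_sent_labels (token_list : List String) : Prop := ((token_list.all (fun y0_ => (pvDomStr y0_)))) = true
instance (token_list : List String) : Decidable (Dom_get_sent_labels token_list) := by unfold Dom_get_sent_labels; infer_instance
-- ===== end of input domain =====

-- B replaces A's interleaved accumulate-and-emit loop by a two-phase scheme: parse every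
-- line into its label first, then cut the label stream at the break markers by index/slice
-- (objective: alternative decomposition, same cost).

-- ===== PORT A =====
-- `token, label = line.rstrip().split()`: Python raises ValueError unless the line has
-- exactly two fields; Pre_ excludes such lines, the port takes field 1 with a default.
def labelA (line : String) : String :=
  (PySem.Str.split₀ (PySem.Str.rstrip line)).getD 1 ""

def get_sent_labels (token_list : List String) : List (List String) :=
  (token_list.foldl
    (fun st line =>
      if line = "\n" then (([] : List String), st.2 ++ [st.1])
      else (st.1 ++ [labelA line], st.2))
    (([] : List String), ([] : List (List String)))).2

-- ===== PORT B =====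
-- phase-1 body of Source B: a '\n' line becomes the break marker `none`, any other line its
-- label; on a malformed line Python B raises ValueError (excluded by Pre_), the port
-- yields `none` there.
def parseLine (line : String) : Option String :=
  if line = "\n" then none
  else
    match PySem.Str.split₀ (PySem.Str.rstrip line) with
    | [_, label] => some label
    | _ => none

-- phase-2 while-loop of Source B: cut the label stream at the first `None`, drop past it.
-- `labels[:b]` holds no `None` in Python (b is the first `None`), so the port's
-- `filterMap id` keeps exactly those labels.
def altSplit (labels : List (Option String)) : List (List String) :=
  match h : PySem.List.index? labels none with
  | none => []
  | some b =>
    ((PySem.List.slice labels none (some (b : Int))).filterMap id)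
      :: altSplit (PySem.List.slice labels (some ((b : Int) + 1)) none)
termination_by labels.length
decreasing_by
  obtain ⟨hb, -, -⟩ := PySem.List.getElem_of_index?_eq_some h
  have hc : ((b : Int) + 1) = ((b + 1 : Nat) : Int) := by push_cast; ring
  rw [hc, PySem.List.slice_from_natCast]
  simp only [List.length_drop]
  omega

def get_sent_labels_alt (token_list : List String) : List (List String) :=
  altSplit (token_list.foldl (fun acc line => acc ++ [parseLine line]) [])

-- ===== PRECONDITION & SPEC =====
def goodLine (line : String) : Bool :=
  line == "\n" || (PySem.Str.split₀ (PySem.Str.rstrip line)).length == 2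

-- Pre_ excludes exactly the inputs on which Python A (and Python B) raises ValueError:
-- some non-'\n' line whose rstrip().split() does not have exactly two fields.
def Pre_get_sent_labels (token_list : List String) : Prop :=
  ∀ l ∈ token_list, goodLine l = true
instance (token_list : List String) : Decidable (Pre_get_sent_labels token_list) := by
  unfold Pre_get_sent_labels; infer_instance

def pvWitness_get_sent_labels : List String := ["The DT", "dog NN", "\n"]

def Spec_get_sent_labels (token_list : List String) (out : List (List String)) : Prop :=
  out = get_sent_labels_alt token_list
instance (token_list : List String) (out : List (List String)) : Decidable (Spec_get_sent_labels token_list out) := by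
  unfold Spec_get_sent_labels; infer_instance

-- ===== CLAIM (what is proved, stated in full; the proofs are below) =====
def Claim_equal_get_sent_labels : Prop := ∀ (token_list : List String), Dom_get_sent_labels token_list → Pre_get_sent_labels token_list → Spec_get_sent_labels token_list (get_sent_labels token_list)

-- ===== LEMMAS AND PROOFS =====

-- reference recursion: A's loop written structurally
def sentsFrom : List String → List String → List (List String)
  | _, [] => []
  | acc, l :: r => if l = "\n" then acc :: sentsFrom [] r else sentsFrom (acc ++ [labelA l]) r

lemma foldA (xs : List String) : ∀ (acc : List String) (out : List (List String)),
    (xs.foldl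
      (fun st line =>
        if line = "\n" then (([] : List String), st.2 ++ [st.1])
        else (st.1 ++ [labelA line], st.2))
      (acc, out)).2 = out ++ sentsFrom acc xs := by
  induction xs with
  | nil => intro acc out; simp [sentsFrom]
  | cons x r ih =>
      intro acc out
      by_cases hx : x = "\n" <;> simp [sentsFrom, hx, ih]

lemma foldB (xs : List String) : ∀ (acc : List (Option String)),
    xs.foldl (fun acc line => acc ++ [parseLine line]) acc = acc ++ xs.map parseLine := by
  induction xs with
  | nil => intro acc; simp
  | cons x r ih => intro acc; simp [ih]

lemma parseLine_good (x : String) (hg : goodLine x = true) (hx : x ≠ "\n") :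
    parseLine x = some (labelA x) := by
  simp only [goodLine, Bool.or_eq_true, beq_iff_eq] at hg
  rcases hg with he | hlen2
  · exact absurd he hx
  · obtain ⟨a, rest, hsl⟩ := List.exists_cons_of_length_pos
      (by omega : 0 < (PySem.Str.split₀ (PySem.Str.rstrip x)).length)
    obtain ⟨b', rest', hsl'⟩ := List.exists_cons_of_length_pos
      (by rw [hsl] at hlen2; simp at hlen2; omega : 0 < rest.length)
    have hnil : rest' = [] := by
      rw [hsl, hsl'] at hlen2; simpa using hlen2
    subst hnil
    simp [parseLine, labelA, if_neg hx, hsl, hsl']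

lemma sentsFrom_no_break (zs : List String) : ∀ acc, "\n" ∉ zs → sentsFrom acc zs = [] := by
  induction zs with
  | nil => intro acc _; rfl
  | cons z r ih =>
      intro acc h
      simp only [List.mem_cons, not_or] at h
      have hz : ¬ (z = "\n") := fun he => h.1 he.symm
      simp only [sentsFrom, if_neg hz]
      exact ih _ h.2

lemma sentsFrom_append_break (l1 : List String) : ∀ (acc l2 : List String), "\n" ∉ l1 →
    sentsFrom acc (l1 ++ "\n" :: l2) = (acc ++ l1.map labelA) :: sentsFrom [] l2 := by
  induction l1 with
  | nil => intro acc l2 _; simp [sentsFrom]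
  | cons x r ih =>
      intro acc l2 h
      simp only [List.mem_cons, not_or] at h
      have hx : ¬ (x = "\n") := fun he => h.1 he.symm
      simp only [List.cons_append, sentsFrom, if_neg hx]
      rw [ih _ l2 h.2]
      simp

lemma filterMap_id_map (l : List String) (h : ∀ x ∈ l, goodLine x = true ∧ x ≠ "\n") :
    (l.map parseLine).filterMap id = l.map labelA := by
  induction l with
  | nil => rfl
  | cons x r ih =>
      have hx := h x (by simp)
      simp only [List.map_cons, List.filterMap_cons, parseLine_good x hx.1 hx.2, id]
      have hr := ih (fun y hy => h y (by simp [hy]))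
      simp only [id] at hr
      rw [hr]

lemma altSplit_eq : ∀ (n : ℕ) (xs : List String), xs.length = n →
    (∀ l ∈ xs, goodLine l = true) → altSplit (xs.map parseLine) = sentsFrom [] xs := by
  intro n
  induction n using Nat.strong_induction_on with
  | _ n ih =>
    intro xs hlen hpre
    rw [altSplit.eq_def]
    split
    · rename_i h
      have hnone := (PySem.List.index?_eq_none_iff (xs.map parseLine) none).1 h
      have hnb : "\n" ∉ xs := by
        intro hm
        exact hnone (by
          refine List.mem_map.2 ⟨"\n", hm, ?_⟩
          simp [parseLine])
      rw [sentsFrom_no_break xs [] hnb]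
    · rename_i b h
      obtain ⟨mpre, msuf, hmap, hlenpre, hnotpre⟩ :=
        (PySem.List.index?_eq_some_iff (xs.map parseLine) none b).1 h
      obtain ⟨l1, l2, hxs, hml1, hml2⟩ := List.map_eq_append_iff.1 hmap
      obtain ⟨a, l2', ha, hpa, hml2'⟩ := List.map_eq_cons_iff.1 hml2
      subst ha
      have hmeml1 : ∀ x ∈ l1, goodLine x = true ∧ x ≠ "\n" := by
        intro x hx
        refine ⟨hpre x (by rw [hxs]; exact List.mem_append_left _ hx), ?_⟩
        intro he
        apply hnotpre
        rw [← hml1]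
        exact List.mem_map.2 ⟨x, hx, by simp [he, parseLine]⟩
      have hnbl1 : "\n" ∉ l1 := fun hm => (hmeml1 _ hm).2 rfl
      have ha' : a = "\n" := by
        by_contra hne
        have := parseLine_good a
          (hpre a (by rw [hxs]; exact List.mem_append_right _ (by simp))) hne
        rw [this] at hpa
        cases hpa
      have htake : (xs.map parseLine).take b = mpre := by
        rw [hmap, ← hlenpre]; simp
      have hdrop : (xs.map parseLine).drop (b + 1) = msuf := by
        rw [hmap, ← hlenpre]
        have hsp : mpre ++ none :: msuf = (mpre ++ [none]) ++ msuf := by simp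
        rw [hsp, show mpre.length + 1 = (mpre ++ [none]).length by simp, List.drop_left]
      have hc : ((b : Int) + 1) = ((b + 1 : Nat) : Int) := by push_cast; ring
      rw [PySem.List.slice_to_natCast, hc, PySem.List.slice_from_natCast, htake, hdrop,
        ← hml1, ← hml2', filterMap_id_map l1 hmeml1]
      have hrec : altSplit (l2'.map parseLine) = sentsFrom [] l2' := by
        apply ih l2'.length _ l2' rfl
        · intro l hl; exact hpre l (by rw [hxs]; exact List.mem_append_right _ (by simp [hl]))
        · rw [hxs] at hlen; simp at hlen; omega
      rw [hrec, hxs, ha', sentsFrom_append_break l1 [] l2' hnbl1, List.nil_append]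

-- ===== VERDICT (by name: the statement is the Claim_ definition above) =====
theorem get_sent_labels_spec : Claim_equal_get_sent_labels := by
  intro xs _ hpre
  unfold Spec_get_sent_labels get_sent_labels get_sent_labels_alt
  rw [foldA, List.nil_append, foldB, List.nil_append,
    altSplit_eq xs.length xs rfl hpre]
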